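-- pv_equiv track=rewrite | github.com/feast-dev/feast | examples/agent_feature_store/agent.py | _pick_best_article
-- ===== SOURCE A (Python) =====
-- def _pick_best_article(query: str, docs: list) -> dict:
--     """Simple keyword matching to select the most relevant article."""
--     query_lower = query.lower()
--     keywords_to_category = {
--         "sso": "Configuring single sign-on",
--         "single sign": "Configuring single sign-on",
--         "password": "How to reset your password",  # pragma: allowlist secret
--         "reset": "How to reset your password",
--         "invoice": "Understanding your invoice",
--         "billing": "Understanding your invoice",
--         "upgrade": "Upgrading your subscription",
--         "plan": "Upgrading your subscription",
--         "api": "Setting up API access",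
--         "rate limit": "Setting up API access",
--         "support": "Contacting support",
--         "contact": "Contacting support",
--     }
--     for keyword, title_prefix in keywords_to_category.items():
--         if keyword in query_lower:
--             for doc in docs:
--                 if doc.get("title", "").startswith(title_prefix):
--                     return doc
--     return docs[0]
-- ===== SOURCE B (Python) =====
-- def _pick_best_article(query: str, docs: list) -> dict:
--     """Simple keyword matching to select the most relevant article."""
--     query_lower = query.lower()
--     keywords_to_category = {
--         "sso": "Configuring single sign-on",
--         "single sign": "Configuring single sign-on",
--         "password": "How to reset your password",  # pragma: allowlist secret
--         "reset": "How to reset your password",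
--         "invoice": "Understanding your invoice",
--         "billing": "Understanding your invoice",
--         "upgrade": "Upgrading your subscription",
--         "plan": "Upgrading your subscription",
--         "api": "Setting up API access",
--         "rate limit": "Setting up API access",
--         "support": "Contacting support",
--         "contact": "Contacting support",
--     }
--     prefixes = list(dict.fromkeys(keywords_to_category.values()))
--     # one pass over docs: first doc seen for each title prefix
--     index = {}
--     for doc in docs:
--         title = doc.get("title", "")
--         for prefix in prefixes:
--             if title.startswith(prefix) and prefix not in index:
--                 index[prefix] = doc
--     for keyword, prefix in keywords_to_category.items():
--         if keyword in query_lower and prefix in index: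
--             return index[prefix]
--     return docs[0]
-- ===== Notes on version B (the rewrite author's own statement) =====
-- stated objective: alternative
-- what changed: B builds a prefix->first-doc index in one pass over docs and then resolves the keyword list by dictionary lookup, instead of A's repeated inner scan of docs for every matching keyword.
import Mathlib
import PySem

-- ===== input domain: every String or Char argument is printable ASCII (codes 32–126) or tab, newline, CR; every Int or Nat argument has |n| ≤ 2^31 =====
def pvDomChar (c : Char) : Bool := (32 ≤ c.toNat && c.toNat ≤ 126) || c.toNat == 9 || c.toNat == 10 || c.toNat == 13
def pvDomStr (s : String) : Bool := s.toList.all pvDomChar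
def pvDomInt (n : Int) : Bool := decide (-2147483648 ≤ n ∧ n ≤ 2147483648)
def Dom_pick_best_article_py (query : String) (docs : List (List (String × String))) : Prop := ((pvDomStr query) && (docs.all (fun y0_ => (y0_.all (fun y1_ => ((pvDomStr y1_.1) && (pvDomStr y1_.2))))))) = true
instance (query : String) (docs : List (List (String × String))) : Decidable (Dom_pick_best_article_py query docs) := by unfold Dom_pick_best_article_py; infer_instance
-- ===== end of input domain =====

-- B builds a prefix->first-doc index in one pass over docs and resolves keywords by lookup,
-- instead of A's repeated inner scan of docs per matching keyword (alternative decomposition).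


-- ===== PORT A =====
-- the keyword -> title-prefix table, in Python insertion order (all keys distinct, so the dict IS this list)
def pvKw : List (String × String) :=
  [("sso", "Configuring single sign-on"),
   ("single sign", "Configuring single sign-on"),
   ("password", "How to reset your password"),
   ("reset", "How to reset your password"),
   ("invoice", "Understanding your invoice"),
   ("billing", "Understanding your invoice"),
   ("upgrade", "Upgrading your subscription"),
   ("plan", "Upgrading your subscription"),
   ("api", "Setting up API access"),
   ("rate limit", "Setting up API access"),
   ("support", "Contacting support"),
   ("contact", "Contacting support")]

-- doc.get("title", "") on an association-list dict: first match, default "" (exact for dict→assoc-list convention)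
def pvGetTitle (doc : List (String × String)) : String :=
  match doc.find? (fun p => p.1 == "title") with
  | some p => p.2
  | none => ""

-- A's inner loop: 'for doc in docs: if doc.get("title","").startswith(title_prefix): return doc'
def pvFindDoc (pre : String) : List (List (String × String)) → Option (List (String × String))
  | [] => none
  | doc :: rest =>
    if PySem.Str.startswith (pvGetTitle doc) pre then some doc else pvFindDoc pre rest

-- A's outer loop over the keyword table
def pvLoopA (ql : String) (docs : List (List (String × String))) :
    List (String × String) → Option (List (String × String))
  | [] => none
  | (kw, pre) :: rest =>
    if PySem.Str.isIn kw ql then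
      match pvFindDoc pre docs with
      | some d => some d
      | none => pvLoopA ql docs rest
    else pvLoopA ql docs rest

def pick_best_article_py (query : String) (docs : List (List (String × String))) : List (String × String) :=
  let query_lower := PySem.Str.lower query
  match pvLoopA query_lower docs pvKw with
  | some d => d
  | none => docs.headD []   -- docs[0]; Python raises IndexError on [], excluded by Pre_

-- ===== PORT B =====
-- list(dict.fromkeys(keywords_to_category.values()))
def pvPrefixes : List String := PySem.List.dedup (pvKw.map Prod.snd)

-- first-match lookup in the index (assoc list in insertion order = Python dict)
def pvLookup (idx : List (String × List (String × String))) (pre : String) :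
    Option (String × List (String × String)) :=
  idx.find? (fun p => p.1 == pre)

-- body of B's index-building pass for one doc
def pvIdxStep (idx : List (String × List (String × String))) (doc : List (String × String)) :
    List (String × List (String × String)) :=
  pvPrefixes.foldl
    (fun idx pre =>
      if PySem.Str.startswith (pvGetTitle doc) pre && (pvLookup idx pre).isNone
      then idx ++ [(pre, doc)] else idx)
    idx

-- B's lookup pass over the keyword table
def pvLoopB (ql : String) (idx : List (String × List (String × String))) :
    List (String × String) → Option (List (String × String))
  | [] => none
  | (kw, pre) :: rest =>
    if PySem.Str.isIn kw ql then
      match pvLookup idx pre with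
      | some p => some p.2
      | none => pvLoopB ql idx rest
    else pvLoopB ql idx rest

def pick_best_article_py_alt (query : String) (docs : List (List (String × String))) : List (String × String) :=
  let query_lower := PySem.Str.lower query
  let idx := docs.foldl pvIdxStep []
  match pvLoopB query_lower idx pvKw with
  | some d => d
  | none => docs.headD []

-- ===== PRECONDITION & SPEC =====
-- Pre_ excludes only docs = [], where Python A (and B) raise IndexError on docs[0] when no keyword matches.
def Pre_pick_best_article_py (_query : String) (docs : List (List (String × String))) : Prop := docs ≠ []
instance (query : String) (docs : List (List (String × String))) : Decidable (Pre_pick_best_article_py query docs) := by unfold Pre_pick_best_article_py; infer_instance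
def pvWitness_pick_best_article_py : String × (List (List (String × String))) :=
  ("how do I reset my password", [[("title", "How to reset your password")]])

def Spec_pick_best_article_py (query : String) (docs : List (List (String × String))) (out : List (String × String)) : Prop := out = pick_best_article_py_alt query docs
instance (query : String) (docs : List (List (String × String))) (out : List (String × String)) : Decidable (Spec_pick_best_article_py query docs out) := by unfold Spec_pick_best_article_py; infer_instance

-- ===== CLAIM (what is proved, stated in full; the proofs are below) =====
def Claim_equal_pick_best_article_py : Prop := ∀ (query : String) (docs : List (List (String × String))), Dom_pick_best_article_py query docs → Pre_pick_best_article_py query docs → Spec_pick_best_article_py query docs (pick_best_article_py query docs)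

-- ===== LEMMAS AND PROOFS =====

-- lookup after indexing one doc: an existing entry survives; otherwise the doc is recorded iff its title matches
theorem pvLookup_idxStep (idx : List (String × List (String × String)))
    (doc : List (String × String)) (pre : String) :
    pvLookup (pvIdxStep idx doc) pre =
      match pvLookup idx pre with
      | some v => some v
      | none =>
        if pre ∈ pvPrefixes ∧ PySem.Str.startswith (pvGetTitle doc) pre = true
        then some (pre, doc) else none := by
  unfold pvIdxStep
  generalize pvPrefixes = ps
  induction ps generalizing idx with
  | nil => simp; cases h : pvLookup idx pre <;> simp
  | cons q qs ih =>
    simp only [List.foldl_cons]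
    by_cases hc : (PySem.Str.startswith (pvGetTitle doc) q && (pvLookup idx q).isNone) = true
    · rw [if_pos hc]
      rw [ih]
      simp only [Bool.and_eq_true, Option.isNone_iff_eq_none] at hc
      obtain ⟨hsw, hnone⟩ := hc
      have happ : pvLookup (idx ++ [(q, doc)]) pre =
          match pvLookup idx pre with
          | some v => some v
          | none => if q == pre then some (q, doc) else none := by
        unfold pvLookup
        rw [List.find?_append]
        cases h : List.find? (fun p => p.1 == pre) idx with
        | some v => simp
        | none =>
          simp [List.find?]
          by_cases hqp : q = pre
          · simp [hqp]
          · have hb : (q == pre) = false := beq_eq_false_iff_ne.mpr hqp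
            simp [hb]
            exact hqp
      rw [happ]
      by_cases hqp : q = pre
      · subst hqp
        rw [hnone]
        simp only [PySem.Str.startswith_eq] at hsw
        simp [hsw]
      · have : (q == pre) = false := by simp [hqp]
        cases h : pvLookup idx pre with
        | some v => simp
        | none =>
          simp only [this, if_false, Bool.false_eq_true]
          have hmem : pre ∈ q :: qs ↔ pre ∈ qs := by
            constructor
            · intro h; rcases List.mem_cons.mp h with h | h
              · exact absurd h.symm hqp
              · exact h
            · exact fun h => List.mem_cons_of_mem _ h
          by_cases hm : pre ∈ qs ∧ PySem.Str.startswith (pvGetTitle doc) pre = true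
          · rw [if_pos hm, if_pos ⟨hmem.mpr hm.1, hm.2⟩]
          · rw [if_neg hm, if_neg (fun h => hm ⟨hmem.mp h.1, h.2⟩)]
    · rw [if_neg hc]
      rw [ih]
      cases h : pvLookup idx pre with
      | some v => simp
      | none =>
        simp only
        by_cases hqp : q = pre
        · subst hqp
          -- condition for q failed although lookup is none, so startswith is false: both ifs are false
          simp only [h, Option.isNone_none, Bool.and_true] at hc
          have hsw : PySem.Str.startswith (pvGetTitle doc) q = false := by
            cases hx : PySem.Str.startswith (pvGetTitle doc) q
            · rfl
            · exact absurd hx hc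
          rw [if_neg (fun hh => by rw [hsw] at hh; exact absurd hh.2 (by simp)),
              if_neg (fun hh => by rw [hsw] at hh; exact absurd hh.2 (by simp))]
        · have hmem : pre ∈ q :: qs ↔ pre ∈ qs := by
            constructor
            · intro hh; rcases List.mem_cons.mp hh with hh | hh
              · exact absurd hh.symm hqp
              · exact hh
            · exact fun hh => List.mem_cons_of_mem _ hh
          by_cases hm : pre ∈ qs ∧ PySem.Str.startswith (pvGetTitle doc) pre = true
          · rw [if_pos hm, if_pos ⟨hmem.mpr hm.1, hm.2⟩]
          · rw [if_neg hm, if_neg (fun hh => hm ⟨hmem.mp hh.1, hh.2⟩)]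

-- the built index answers, for any prefix in the table, exactly A's first-matching-doc scan
theorem pvLookup_build (docs : List (List (String × String)))
    (idx : List (String × List (String × String))) (pre : String) (hp : pre ∈ pvPrefixes) :
    pvLookup (docs.foldl pvIdxStep idx) pre =
      match pvLookup idx pre with
      | some v => some v
      | none => (pvFindDoc pre docs).map (fun d => (pre, d)) := by
  induction docs generalizing idx with
  | nil => simp [pvFindDoc]; cases h : pvLookup idx pre <;> simp
  | cons doc rest ih =>
    simp only [List.foldl_cons]
    rw [ih, pvLookup_idxStep]
    cases h : pvLookup idx pre with
    | some v => simp
    | none =>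
      simp only
      by_cases hsw : PySem.Str.startswith (pvGetTitle doc) pre = true
      · rw [if_pos ⟨hp, hsw⟩]
        simp only [PySem.Str.startswith_eq] at hsw
        simp [pvFindDoc, hsw]
      · have hsw' : PySem.Str.startswith (pvGetTitle doc) pre = false := by
          cases hx : PySem.Str.startswith (pvGetTitle doc) pre
          · rfl
          · exact absurd hx hsw
        rw [if_neg (fun hh => hsw hh.2)]
        simp only [PySem.Str.startswith_eq] at hsw'
        simp [pvFindDoc, hsw']

-- both keyword loops agree as long as every prefix in the table occurs in pvPrefixes
theorem pvLoop_eq (ql : String) (docs : List (List (String × String)))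
    (kws : List (String × String)) (h : ∀ kp ∈ kws, kp.2 ∈ pvPrefixes) :
    pvLoopB ql (docs.foldl pvIdxStep []) kws = pvLoopA ql docs kws := by
  induction kws with
  | nil => rfl
  | cons kp rest ih =>
    obtain ⟨kw, pre⟩ := kp
    have hp : pre ∈ pvPrefixes := h (kw, pre) (List.mem_cons_self)
    have hrest : ∀ kp ∈ rest, kp.2 ∈ pvPrefixes := fun kp hk => h kp (List.mem_cons_of_mem _ hk)
    simp only [pvLoopA, pvLoopB]
    by_cases hin : PySem.Str.isIn kw ql = true
    · rw [if_pos hin, if_pos hin]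
      rw [pvLookup_build docs [] pre hp]
      cases hfd : pvFindDoc pre docs with
      | some d => simp [pvLookup]
      | none => simp [pvLookup, ih hrest]
    · rw [if_neg hin, if_neg hin, ih hrest]

-- ===== VERDICT (by name: the statement is the Claim_ definition above) =====
theorem pick_best_article_py_spec : Claim_equal_pick_best_article_py := by
  intro query docs _ _
  unfold Spec_pick_best_article_py pick_best_article_py pick_best_article_py_alt
  simp only
  rw [pvLoop_eq (PySem.Str.lower query) docs pvKw (by decide)]
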